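-- pv_equiv track=rewrite | github.com/MortalHappiness/cornell-cs6158-final | src/torch_to_tvm/convert.py | parse_batch_response
-- ===== SOURCE A (Python) =====
-- def parse_batch_response(text: str):
--     """
--     Expect output like:
--
--         ### BEGIN FILE path/to/file.py
--         ...lines...
--         ### END FILE
--
--     Returns: dict[path -> code_str]
--     """
--     files = {}
--     lines = text.splitlines()
--     i = 0
--     n = len(lines)
--
--     while i < n:
--         line = lines[i].strip()
--         if line.startswith("### BEGIN FILE "):
--             rel_path = line.replace("### BEGIN FILE ", "").strip()
--             i += 1
--             start = i
--             while i < n and not lines[i].strip().startswith("### END FILE"):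
--                 i += 1
--             code = "\n".join(lines[start:i]).rstrip() + "\n"
--             files[rel_path] = code
--         i += 1
--
--     return files
-- ===== SOURCE B (Python) =====
-- def parse_batch_response(text: str):
--     """Single flat state-machine pass over the lines instead of a nested scan."""
--     files = {}
--     rel_path = None
--     acc = []
--     for raw in text.splitlines():
--         line = raw.strip()
--         if rel_path is None:
--             if line.startswith("### BEGIN FILE "):
--                 rel_path = line.replace("### BEGIN FILE ", "").strip()
--                 acc = []
--         elif line.startswith("### END FILE"):
--             files[rel_path] = "\n".join(acc).rstrip() + "\n"
--             rel_path = None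
--         else:
--             acc.append(raw)
--     if rel_path is not None:
--         files[rel_path] = "\n".join(acc).rstrip() + "\n"
--     return files
-- ===== Notes on version B (the rewrite author's own statement) =====
-- stated objective: alternative
-- what changed: Replaced A's nested scan (outer while over an index plus an inner while hunting for the END marker, then a lines[start:i] slice join) with a single flat state-machine pass that keeps an open-block path and a line accumulator and flushes on END or at EOF.
import Mathlib
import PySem

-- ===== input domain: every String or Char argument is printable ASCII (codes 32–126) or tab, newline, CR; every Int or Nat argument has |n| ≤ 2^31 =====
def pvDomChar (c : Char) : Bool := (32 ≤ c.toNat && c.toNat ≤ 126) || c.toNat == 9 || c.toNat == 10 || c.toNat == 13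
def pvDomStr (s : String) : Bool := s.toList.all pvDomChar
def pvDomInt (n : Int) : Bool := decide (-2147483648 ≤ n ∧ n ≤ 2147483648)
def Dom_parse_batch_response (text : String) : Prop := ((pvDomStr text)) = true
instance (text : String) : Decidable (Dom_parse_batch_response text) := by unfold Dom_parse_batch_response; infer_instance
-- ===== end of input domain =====

-- B replaces A's nested index scan (outer while + inner while hunting for the END
-- marker) by a single flat state-machine pass over the lines; same return value,
-- same cost class (objective: alternative decomposition).

-- ===== PORT A =====
-- shared literal markers and the code-assembly expression
-- ("\n".join(xs).rstrip() + "\n"), identical text in both Pythons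
def pvBegin : List Char := "### BEGIN FILE ".toList
def pvEnd : List Char := "### END FILE".toList
def pvCode (xs : List (List Char)) : List Char :=
  PySem.Chars.rstrip (PySem.Chars.join ['\n'] xs) ++ ['\n']

-- A's inner 'while i < n and not lines[i].strip().startswith("### END FILE"): i += 1'
def pvBlockEnd (lines : List (List Char)) (n i : Nat) : Nat :=
  if i < n then
    if PySem.Chars.startswith (PySem.Chars.strip (lines.getD i [])) pvEnd then i
    else pvBlockEnd lines n (i + 1)
  else i
termination_by n - i

theorem pvBlockEnd_le_self (lines : List (List Char)) (n i : Nat) :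
    i ≤ pvBlockEnd lines n i := by
  fun_induction pvBlockEnd lines n i <;> omega

-- A's outer while loop over the index i
def pvParseA (lines : List (List Char)) (n i : Nat)
    (files : PySem.Dict (List Char) (List Char)) : PySem.Dict (List Char) (List Char) :=
  if i < n then
    let line := PySem.Chars.strip (lines.getD i [])
    if PySem.Chars.startswith line pvBegin then
      let rel := PySem.Chars.strip (PySem.Chars.replace line pvBegin [])
      let j := pvBlockEnd lines n (i + 1)
      pvParseA lines n (j + 1)
        (files.insert rel (pvCode (PySem.List.slice lines (some ((i + 1 : Nat) : Int)) (some ((j : Nat) : Int)))))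
    else pvParseA lines n (i + 1) files
  else files
termination_by n - i
decreasing_by
  · have := pvBlockEnd_le_self lines n (i + 1)
    omega
  · omega

def parse_batch_response (text : String) : List (String × String) :=
  let lines := (PySem.Str.splitlines text).map String.toList
  (pvParseA lines lines.length 0 PySem.Dict.empty).items.map
    (fun p => (String.ofList p.1, String.ofList p.2))

-- ===== PORT B =====
-- B's loop state: (files, rel_path : Option, acc)
def pvStepB (st : PySem.Dict (List Char) (List Char) × Option (List Char) × List (List Char))
    (raw : List Char) : PySem.Dict (List Char) (List Char) × Option (List Char) × List (List Char) :=
  let line := PySem.Chars.strip raw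
  match st with
  | (files, none, acc) =>
      if PySem.Chars.startswith line pvBegin then
        (files, some (PySem.Chars.strip (PySem.Chars.replace line pvBegin [])), [])
      else (files, none, acc)
  | (files, some rel, acc) =>
      if PySem.Chars.startswith line pvEnd then
        (files.insert rel (pvCode acc), none, [])
      else (files, some rel, acc ++ [raw])

-- B's trailing 'if rel_path is not None' flush
def pvFinishB (st : PySem.Dict (List Char) (List Char) × Option (List Char) × List (List Char)) :
    PySem.Dict (List Char) (List Char) :=
  match st with
  | (files, none, _) => files
  | (files, some rel, acc) => files.insert rel (pvCode acc)

def parse_batch_response_alt (text : String) : List (String × String) :=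
  let lines := (PySem.Str.splitlines text).map String.toList
  (pvFinishB (lines.foldl pvStepB (PySem.Dict.empty, none, []))).items.map
    (fun p => (String.ofList p.1, String.ofList p.2))

-- ===== PRECONDITION & SPEC =====
def Spec_parse_batch_response (text : String) (out : List (String × String)) : Prop := out = parse_batch_response_alt text
instance (text : String) (out : List (String × String)) : Decidable (Spec_parse_batch_response text out) := by unfold Spec_parse_batch_response; infer_instance

-- ===== CLAIM (what is proved, stated in full; the proofs are below) =====
def Claim_equal_parse_batch_response : Prop := ∀ (text : String), Dom_parse_batch_response text → Spec_parse_batch_response text (parse_batch_response text)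

-- ===== LEMMAS AND PROOFS =====

theorem pvBlockEnd_le_n (lines : List (List Char)) (n i : Nat) (h : i ≤ n) :
    pvBlockEnd lines n i ≤ n := by
  fun_induction pvBlockEnd lines n i <;> omega

-- the fold from an open-block state consumes lines up to A's inner-scan stop index
theorem pvInner (ls : List (List Char)) (s : Nat) (hs : s ≤ ls.length)
    (files : PySem.Dict (List Char) (List Char)) (rel : List Char) (a : List (List Char)) :
    pvFinishB ((ls.drop s).foldl pvStepB (files, some rel, a)) =
      (if pvBlockEnd ls ls.length s < ls.length then
        pvFinishB ((ls.drop (pvBlockEnd ls ls.length s + 1)).foldl pvStepB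
          (files.insert rel (pvCode (a ++ List.take (pvBlockEnd ls ls.length s - s) (ls.drop s))), none, []))
      else files.insert rel (pvCode (a ++ ls.drop s))) := by
  by_cases h : s < ls.length
  · have hdrop : ls.drop s = ls[s] :: ls.drop (s + 1) := List.drop_eq_getElem_cons h
    by_cases hend : PySem.Chars.startswith (PySem.Chars.strip ls[s]) pvEnd = true
    · have hbe : pvBlockEnd ls ls.length s = s := by
        rw [pvBlockEnd]; simp [h, hend]
      rw [hdrop, List.foldl_cons, hbe]
      simp [pvStepB, hend, h]
    · have hbe : pvBlockEnd ls ls.length s = pvBlockEnd ls ls.length (s + 1) := by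
        rw [pvBlockEnd]; simp [h, hend]
      have hle : s + 1 ≤ pvBlockEnd ls ls.length (s + 1) := pvBlockEnd_le_self ls ls.length (s + 1)
      rw [hdrop, List.foldl_cons]
      have hstep : pvStepB (files, some rel, a) ls[s] = (files, some rel, a ++ [ls[s]]) := by
        simp [pvStepB, hend]
      rw [hstep, pvInner ls (s + 1) (by omega) files rel (a ++ [ls[s]]), hbe]
      by_cases hj : pvBlockEnd ls ls.length (s + 1) < ls.length
      · have harg : (a ++ [ls[s]]) ++ List.take (pvBlockEnd ls ls.length (s + 1) - (s + 1)) (ls.drop (s + 1))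
            = a ++ List.take (pvBlockEnd ls ls.length (s + 1) - s) (ls.drop s) := by
          have h1 : pvBlockEnd ls ls.length (s + 1) - s = (pvBlockEnd ls ls.length (s + 1) - (s + 1)) + 1 := by omega
          rw [hdrop, h1, List.take_succ_cons]
          simp
        simp [hj, harg]
      · have harg : (a ++ [ls[s]]) ++ ls.drop (s + 1) = a ++ ls.drop s := by
          rw [hdrop]; simp
        simp [hj, harg]
  · have hs' : s = ls.length := by omega
    have hbe : pvBlockEnd ls ls.length s = s := by rw [pvBlockEnd]; simp [h]
    rw [hbe]
    simp [pvFinishB, hs']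
termination_by ls.length - s

-- A's outer loop from index i equals B's fold over the remaining lines in idle state
theorem pvMain (ls : List (List Char)) (i : Nat) (hi : i ≤ ls.length)
    (files : PySem.Dict (List Char) (List Char)) :
    pvParseA ls ls.length i files =
      pvFinishB ((ls.drop i).foldl pvStepB (files, none, [])) := by
  by_cases h : i < ls.length
  · have hdrop : ls.drop i = ls[i] :: ls.drop (i + 1) := List.drop_eq_getElem_cons h
    by_cases hbeg : PySem.Chars.startswith (PySem.Chars.strip ls[i]) pvBegin = true
    · have hle : i + 1 ≤ pvBlockEnd ls ls.length (i + 1) := pvBlockEnd_le_self ls ls.length (i + 1)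
      have hln : pvBlockEnd ls ls.length (i + 1) ≤ ls.length := pvBlockEnd_le_n ls ls.length (i + 1) (by omega)
      have hstep : pvStepB (files, none, ([] : List (List Char))) ls[i]
          = (files, some (PySem.Chars.strip (PySem.Chars.replace (PySem.Chars.strip ls[i]) pvBegin [])), []) := by
        simp [pvStepB, hbeg]
      rw [hdrop, List.foldl_cons, hstep,
        pvInner ls (i + 1) (by omega) files _ []]
      rw [pvParseA]
      simp only [h, if_true, List.getD_eq_getElem ls [] h, hbeg]
      rw [PySem.List.slice_natCast]
      by_cases hj : pvBlockEnd ls ls.length (i + 1) < ls.length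
      · rw [pvMain ls (pvBlockEnd ls ls.length (i + 1) + 1) (by omega) _]
        simp [hj]
      · have hjn : pvBlockEnd ls ls.length (i + 1) = ls.length := by omega
        rw [pvParseA]
        rw [hjn, List.take_of_length_le (by simp)]
        simp
    · have hstep : pvStepB (files, none, ([] : List (List Char))) ls[i] = (files, none, []) := by
        simp [pvStepB, hbeg]
      rw [hdrop, List.foldl_cons, hstep, ← pvMain ls (i + 1) (by omega) files]
      rw [pvParseA]
      simp [h, hbeg]
  · rw [pvParseA]
    simp [pvFinishB, List.drop_of_length_le (by omega : ls.length ≤ i), h]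
termination_by ls.length - i

-- ===== VERDICT (by name: the statement is the Claim_ definition above) =====
theorem parse_batch_response_spec : Claim_equal_parse_batch_response := by
  intro text _
  unfold Spec_parse_batch_response parse_batch_response parse_batch_response_alt
  simp [pvMain _ 0 (Nat.zero_le _)]
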